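-- pv_equiv track=rewrite | github.com/kyleyarwood/advent-of-code | 2020/day6.py | get_num_yes_for_groups
-- ===== SOURCE A (Python) =====
-- def get_num_yes_for_groups(lines):
--     result = 0
--     qs = set()
--     first_of_group = True
--     for line in lines:
--         if line=='':
--             result += len(qs)
--             qs = set()
--             continue
--         for c in line:
--             if c not in qs:
--                 qs.add(c)
--     result += len(qs)
--     return result
-- ===== SOURCE B (Python) =====
-- def get_num_yes_for_groups(lines):
--     groups = [[]]
--     for line in lines:
--         if line == '':
--             groups.append([])
--         else:
--             groups[-1].append(line)
--     return sum(len(set(''.join(group))) for group in groups)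
-- ===== Notes on version B (the rewrite author's own statement) =====
-- stated objective: simpler
-- what changed: B first partitions the lines into groups of non-empty lines, then sums the distinct-character count of each joined group in a separate pass, instead of interleaving a running set and counter through one loop.
import Mathlib
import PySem

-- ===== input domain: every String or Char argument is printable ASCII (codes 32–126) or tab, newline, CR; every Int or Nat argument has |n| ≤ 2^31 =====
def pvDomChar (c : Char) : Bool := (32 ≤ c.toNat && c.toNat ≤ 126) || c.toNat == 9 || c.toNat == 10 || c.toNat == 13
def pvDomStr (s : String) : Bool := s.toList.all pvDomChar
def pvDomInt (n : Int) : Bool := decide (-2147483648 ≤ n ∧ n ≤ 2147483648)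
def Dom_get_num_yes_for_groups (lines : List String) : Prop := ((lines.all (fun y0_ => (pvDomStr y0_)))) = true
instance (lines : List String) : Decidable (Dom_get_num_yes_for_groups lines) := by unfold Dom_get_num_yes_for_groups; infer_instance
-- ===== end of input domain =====

-- B separates the work into two passes — partition the lines into groups, then sum each group's distinct-character count — instead of A's interleaved running set and counter (objective: simpler).

-- ===== PORT A =====
-- Literal port of A: one pass keeping a running total and a running set of answers.
def get_num_yes_for_groups (lines : List String) : Int :=
  let st := lines.foldl
    (fun (st : Int × PySem.Set Char) line =>
      if line = "" then
        (st.1 + PySem.Set.len st.2, PySem.Set.empty)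
      else
        (st.1, line.toList.foldl
          (fun qs c => if PySem.Set.contains qs c then qs else PySem.Set.add qs c) st.2))
    (0, PySem.Set.empty)
  st.1 + PySem.Set.len st.2

-- ===== PORT B =====
-- B: partition lines into groups, then sum distinct-character counts per group.
-- groups[-1].append(line)
def pvAppendLast (groups : List (List String)) (line : String) : List (List String) :=
  groups.dropLast ++ [groups.getLast! ++ [line]]

-- set(''.join(group)) has exactly the characters of group.flatMap toList, first occurrences — exact.
def get_num_yes_for_groups_alt (lines : List String) : Int :=
  let groups := lines.foldl
    (fun gs line => if line = "" then gs ++ [([] : List String)] else pvAppendLast gs line)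
    [[]]
  (groups.map (fun g => PySem.Set.len (PySem.Set.ofList (g.flatMap String.toList)))).sum

-- ===== PRECONDITION & SPEC =====
def Spec_get_num_yes_for_groups (lines : List String) (out : Int) : Prop := out = get_num_yes_for_groups_alt lines
instance (lines : List String) (out : Int) : Decidable (Spec_get_num_yes_for_groups lines out) := by unfold Spec_get_num_yes_for_groups; infer_instance

-- ===== CLAIM (what is proved, stated in full; the proofs are below) =====
def Claim_equal_get_num_yes_for_groups : Prop := ∀ (lines : List String), Dom_get_num_yes_for_groups lines → Spec_get_num_yes_for_groups lines (get_num_yes_for_groups lines)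

-- ===== LEMMAS AND PROOFS =====

def pvCs (g : List String) : PySem.Set Char :=
  PySem.Set.ofList (g.flatMap String.toList)

def pvCnt (g : List String) : Int := PySem.Set.len (pvCs g)

def pvCountFrom (qs : PySem.Set Char) : List String → Int
  | [] => PySem.Set.len qs
  | l :: t =>
    if l = "" then PySem.Set.len qs + pvCountFrom PySem.Set.empty t
    else pvCountFrom (l.toList.foldl PySem.Set.add qs) t

def pvRecGroups (g : List String) : List String → List (List String)
  | [] => [g]
  | l :: t => if l = "" then g :: pvRecGroups [] t else pvRecGroups (g ++ [l]) t

theorem pv_inner_eq :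
    (fun (qs : PySem.Set Char) (c : Char) =>
        if PySem.Set.contains qs c then qs else PySem.Set.add qs c) = PySem.Set.add := by
  funext qs c
  simp only [PySem.Set.add]
  split_ifs <;> rfl

theorem pv_aloop (lines : List String) :
    ∀ (r : Int) (qs : PySem.Set Char),
      (List.foldl
        (fun (st : Int × PySem.Set Char) line =>
          if line = "" then (st.1 + PySem.Set.len st.2, PySem.Set.empty)
          else (st.1, line.toList.foldl PySem.Set.add st.2)) (r, qs) lines).1 +
      PySem.Set.len (List.foldl
        (fun (st : Int × PySem.Set Char) line =>
          if line = "" then (st.1 + PySem.Set.len st.2, PySem.Set.empty)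
          else (st.1, line.toList.foldl PySem.Set.add st.2)) (r, qs) lines).2
      = r + pvCountFrom qs lines := by
  induction lines with
  | nil => intro r qs; simp [pvCountFrom]
  | cons l t ih =>
    intro r qs
    by_cases h : l = ""
    · simp only [List.foldl_cons, h, if_true, pvCountFrom]
      rw [ih]
      ring
    · simp only [List.foldl_cons, pvCountFrom, if_neg h]
      exact ih r _

theorem pv_cs_append (g : List String) (l : String) :
    l.toList.foldl PySem.Set.add (pvCs g) = pvCs (g ++ [l]) := by
  simp [pvCs, PySem.Set.ofList_eq_foldl, List.flatMap_append, List.foldl_append]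

theorem pv_countFrom_eq (lines : List String) :
    ∀ (g : List String),
      pvCountFrom (pvCs g) lines = ((pvRecGroups g lines).map pvCnt).sum := by
  induction lines with
  | nil => intro g; simp [pvCountFrom, pvRecGroups, pvCnt]
  | cons l t ih =>
    intro g
    by_cases h : l = ""
    · have h0 : pvCs ([] : List String) = PySem.Set.empty := rfl
      simp only [pvCountFrom, pvRecGroups, if_pos h, List.map_cons, List.sum_cons]
      rw [← h0, ih []]
      rfl
    · simp only [pvCountFrom, pvRecGroups, if_neg h]
      rw [pv_cs_append, ih]

theorem pv_getLast!_concat (gs : List (List String)) (g : List String) :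
    (gs ++ [g]).getLast! = g := by
  induction gs with
  | nil => rfl
  | cons a t ih =>
    cases t with
    | nil => rfl
    | cons b u => simpa [List.getLast!] using ih

theorem pv_bgroups (lines : List String) :
    ∀ (gs : List (List String)) (g : List String),
      lines.foldl
        (fun gs line => if line = "" then gs ++ [([] : List String)] else pvAppendLast gs line)
        (gs ++ [g]) = gs ++ pvRecGroups g lines := by
  induction lines with
  | nil => intro gs g; simp [pvRecGroups]
  | cons l t ih =>
    intro gs g
    by_cases h : l = ""
    · simp only [List.foldl_cons, pvRecGroups, if_pos h]
      rw [show (gs ++ [g]) ++ [([] : List String)] = (gs ++ [g]) ++ [([] : List String)] from rfl,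
        ih (gs ++ [g]) []]
      simp
    · simp only [List.foldl_cons, pvRecGroups, if_neg h]
      have hl : pvAppendLast (gs ++ [g]) l = gs ++ [g ++ [l]] := by
        simp [pvAppendLast, pv_getLast!_concat]
      rw [hl]
      exact ih gs (g ++ [l])

-- ===== VERDICT (by name: the statement is the Claim_ definition above) =====
theorem get_num_yes_for_groups_spec : Claim_equal_get_num_yes_for_groups := by
  intro lines _
  show get_num_yes_for_groups lines = get_num_yes_for_groups_alt lines
  unfold get_num_yes_for_groups get_num_yes_for_groups_alt
  rw [pv_inner_eq, pv_aloop lines 0 PySem.Set.empty]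
  have h0 : (PySem.Set.empty : PySem.Set Char) = pvCs [] := rfl
  rw [h0, pv_countFrom_eq lines []]
  have hg := pv_bgroups lines [] []
  simp only [List.nil_append] at hg
  rw [hg]
  have : (pvRecGroups [] lines).map pvCnt
      = (pvRecGroups [] lines).map
          (fun g => ((PySem.Set.ofList (g.flatMap String.toList)).length : Int)) :=
    List.map_congr_left fun g _ => rfl
  rw [this]
  simp [PySem.Set.len]
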